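-- pv_equiv track=rewrite | github.com/justin2303/ecs170_WebAppProject | backend/api/utils/misc.py | extract_maze_data
-- ===== SOURCE A (Python) =====
-- PLAYER = 'X'
--
-- GOAL = 'Y'
--
-- def extract_maze_data(maze_data):
--     start_coords = None
--     end_coords = None
--     maze = []
--
--     for i, row in enumerate(maze_data):
--         maze_row = []
--         for j, cell in enumerate(row):
--             if cell == PLAYER:
--                 start_coords = [i, j]
--                 maze_row.append(0)
--             elif cell == GOAL:
--                 end_coords = [i, j]
--                 maze_row.append(0)
--             elif cell == '0':
--                 maze_row.append(0)
--             elif cell == '1':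
--                 maze_row.append(1)
--         maze.append(maze_row)
--
--     return maze, start_coords, end_coords
-- ===== SOURCE B (Python) =====
-- PLAYER = 'X'
--
-- GOAL = 'Y'
--
-- VAL = {PLAYER: 0, GOAL: 0, '0': 0, '1': 1}
--
--
-- def extract_maze_data(maze_data):
--     maze = [[VAL[c] for c in row if c in VAL] for row in maze_data]
--     start_coords = next(([i, j] for i, row in enumerate(maze_data)
--                          for j, c in enumerate(row) if c == PLAYER), None)
--     end_coords = next(([i, j] for i, row in enumerate(maze_data)
--                        for j, c in enumerate(row) if c == GOAL), None)
--     return maze, start_coords, end_coords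
-- ===== Notes on version B (the rewrite author's own statement) =====
-- stated objective: alternative
-- what changed: Replaces A's single fused classify-and-record loop by a value-table comprehension building the matrix plus separate first-match scans for the coordinates; Pre_ excludes grids with more than one 'X' or more than one 'Y' cell, where A's last-overwrite and B's first-match are both defensible on an unspecified duplicate-marker corner.
-- outside the precondition, e.g. on extract_maze_data([['X', 'X']]): A returns ([[0, 0]], [0, 1], None), B returns ([[0, 0]], [0, 0], None); on extract_maze_data([['Y'], ['Y']]): A returns ([[0], [0]], None, [1, 0]), B returns ([[0], [0]], None, [0, 0])
import Mathlib
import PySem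

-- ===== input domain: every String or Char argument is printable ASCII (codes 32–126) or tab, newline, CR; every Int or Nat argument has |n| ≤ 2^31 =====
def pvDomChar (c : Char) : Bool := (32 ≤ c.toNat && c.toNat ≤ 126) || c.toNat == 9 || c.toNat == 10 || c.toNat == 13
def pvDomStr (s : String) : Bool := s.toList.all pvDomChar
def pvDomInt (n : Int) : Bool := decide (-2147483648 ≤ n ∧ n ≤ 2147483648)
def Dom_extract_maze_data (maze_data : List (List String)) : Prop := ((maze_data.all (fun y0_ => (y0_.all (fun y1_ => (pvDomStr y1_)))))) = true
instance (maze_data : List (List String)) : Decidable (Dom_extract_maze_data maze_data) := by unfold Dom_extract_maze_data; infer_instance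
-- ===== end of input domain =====

-- B builds the matrix with a value table and finds each coordinate by a separate first-match
-- scan, instead of A's single fused classify-and-record loop; Pre_ excludes duplicate markers.

-- ===== PORT A =====
-- literal transliteration of A's fused loop: one fold over enumerated rows, whose inner fold
-- over the enumerated cells threads (maze_row, start_coords, end_coords) exactly as A does.
def extract_maze_data (maze_data : List (List String)) : List (List Int) × Option (List Int) × Option (List Int) :=
  let r := (PySem.List.enumerate maze_data 0).foldl
    (fun (st : List (List Int) × Option (List Int) × Option (List Int)) p =>
      let inner := (PySem.List.enumerate p.2 0).foldl
        (fun (st2 : List Int × Option (List Int) × Option (List Int)) q =>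
          if q.2 == "X" then (st2.1 ++ [0], some [p.1, q.1], st2.2.2)
          else if q.2 == "Y" then (st2.1 ++ [0], st2.2.1, some [p.1, q.1])
          else if q.2 == "0" then (st2.1 ++ [0], st2.2.1, st2.2.2)
          else if q.2 == "1" then (st2.1 ++ [1], st2.2.1, st2.2.2)
          else st2)
        ([], st.2.1, st.2.2)
      (st.1 ++ [inner.1], inner.2.1, inner.2.2))
    ([], none, none)
  r

-- ===== PORT B =====
def pvVAL : PySem.Dict String Int := PySem.Dict.ofList [("X", 0), ("Y", 0), ("0", 0), ("1", 1)]

-- [[VAL[c] for c in row if c in VAL] for row in maze_data]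
def pvMazeRow (row : List String) : List Int :=
  row.filterMap (fun c => PySem.Dict.get? pvVAL c)

-- the generator ([i, j] for i, row in enumerate(maze_data) for j, c in enumerate(row) if c == ch)
def pvOcc (maze_data : List (List String)) (ch : String) : List (List Int) :=
  (PySem.List.enumerate maze_data 0).flatMap (fun p =>
    (PySem.List.enumerate p.2 0).filterMap (fun q =>
      if q.2 == ch then some [p.1, q.1] else none))

-- next(gen, None): the first produced element, or None
def pvFirstPos (maze_data : List (List String)) (ch : String) : Option (List Int) :=
  (pvOcc maze_data ch).head?

def extract_maze_data_alt (maze_data : List (List String)) : List (List Int) × Option (List Int) × Option (List Int) :=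
  (maze_data.map pvMazeRow, pvFirstPos maze_data "X", pvFirstPos maze_data "Y")

-- ===== PRECONDITION & SPEC =====
-- Pre_ excludes grids with more than one "X" or more than one "Y" cell (A still returns there):
-- A's last-overwrite and B's first-match are both defensible on that unspecified duplicate-marker corner.
def Pre_extract_maze_data (maze_data : List (List String)) : Prop :=
  (maze_data.flatMap id).count "X" ≤ 1 ∧ (maze_data.flatMap id).count "Y" ≤ 1
instance (maze_data : List (List String)) : Decidable (Pre_extract_maze_data maze_data) := by unfold Pre_extract_maze_data; infer_instance

def pvWitness_extract_maze_data : List (List String) := [["X", "1", "?"], ["0", "Y"]]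

def Spec_extract_maze_data (maze_data : List (List String)) (out : List (List Int) × Option (List Int) × Option (List Int)) : Prop := out = extract_maze_data_alt maze_data
instance (maze_data : List (List String)) (out : List (List Int) × Option (List Int) × Option (List Int)) : Decidable (Spec_extract_maze_data maze_data out) := by unfold Spec_extract_maze_data; infer_instance

-- ===== CLAIM (what is proved, stated in full; the proofs are below) =====
def Claim_equal_extract_maze_data : Prop := ∀ (maze_data : List (List String)), Dom_extract_maze_data maze_data → Pre_extract_maze_data maze_data → Spec_extract_maze_data maze_data (extract_maze_data maze_data)

-- ===== LEMMAS AND PROOFS =====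

lemma pv_elim_none_some {α : Type} (o : Option α) : o.elim none some = o := by
  cases o <;> rfl

lemma pv_last_cons {α : Type} (x : α) (l : List α) (sc : Option α) :
    ((x :: l).getLast?).elim sc some = (l.getLast?).elim (some x) some := by
  cases l with
  | nil => rfl
  | cons y t =>
    rw [List.getLast?_cons_cons]
    cases e : (y :: t).getLast? with
    | none => simp [List.getLast?_eq_none_iff] at e
    | some z => rfl

lemma pv_last_append {α : Type} (l1 l2 : List α) (sc : Option α) :
    ((l1 ++ l2).getLast?).elim sc some = (l2.getLast?).elim ((l1.getLast?).elim sc some) some := by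
  induction l1 generalizing sc with
  | nil => simp
  | cons x t ih => rw [List.cons_append, pv_last_cons, pv_last_cons, ih]

lemma pvVAL_get? (c : String) : PySem.Dict.get? pvVAL c =
    (if c == "X" then some 0 else if c == "Y" then some 0 else
     if c == "0" then some (0 : Int) else if c == "1" then some 1 else none) := by
  have h : pvVAL = (((PySem.Dict.empty.insert "X" (0 : Int)).insert "Y" 0).insert "0" 0).insert "1" 1 := rfl
  rw [h]
  simp only [PySem.Dict.get?_insert, PySem.Dict.get?_empty]
  by_cases h1 : c = "X" <;> by_cases h2 : c = "Y" <;> by_cases h3 : c = "0" <;>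
    by_cases h4 : c = "1" <;> simp_all

-- occurrences of ch in one enumerated row i, as B's inner comprehension
def pvOccRow (i : Int) (row : List String) (s : Int) (ch : String) : List (List Int) :=
  (PySem.List.enumerate row s).filterMap (fun q =>
    if q.2 == ch then some [i, q.1] else none)

lemma inner_fold_eq (i : Int) (row : List String) : ∀ (s : Int) (mr : List Int)
    (sc ec : Option (List Int)),
    (PySem.List.enumerate row s).foldl
      (fun (st2 : List Int × Option (List Int) × Option (List Int)) q =>
        if q.2 == "X" then (st2.1 ++ [0], some [i, q.1], st2.2.2)
        else if q.2 == "Y" then (st2.1 ++ [0], st2.2.1, some [i, q.1])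
        else if q.2 == "0" then (st2.1 ++ [0], st2.2.1, st2.2.2)
        else if q.2 == "1" then (st2.1 ++ [1], st2.2.1, st2.2.2)
        else st2)
      (mr, sc, ec)
    = (mr ++ pvMazeRow row,
       ((pvOccRow i row s "X").getLast?).elim sc some,
       ((pvOccRow i row s "Y").getLast?).elim ec some) := by
  induction row with
  | nil => intro s mr sc ec; simp [pvMazeRow, pvOccRow, PySem.List.enumerate_nil]
  | cons c rest ih =>
    intro s mr sc ec
    rw [PySem.List.enumerate_cons]
    simp only [List.foldl_cons]
    have hrow : pvMazeRow (c :: rest) = (PySem.Dict.get? pvVAL c).elim [] (fun v => [v]) ++ pvMazeRow rest := by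
      simp only [pvMazeRow, List.filterMap_cons]
      cases PySem.Dict.get? pvVAL c <;> rfl
    have hoccX : pvOccRow i (c :: rest) s "X"
        = (if c == "X" then [[i, s]] else []) ++ pvOccRow i rest (s + 1) "X" := by
      simp only [pvOccRow, PySem.List.enumerate_cons, List.filterMap_cons]
      by_cases h : c == "X" <;> simp_all
    have hoccY : pvOccRow i (c :: rest) s "Y"
        = (if c == "Y" then [[i, s]] else []) ++ pvOccRow i rest (s + 1) "Y" := by
      simp only [pvOccRow, PySem.List.enumerate_cons, List.filterMap_cons]
      by_cases h : c == "Y" <;> simp_all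
    by_cases h1 : c = "X"
    · subst h1
      simp only [BEq.rfl, if_true] at hoccX hoccY ⊢
      simp only [show (("X" : String) == "Y") = false from rfl] at hoccY
      rw [ih, hrow, pvVAL_get?, hoccX, hoccY, pv_last_append]
      simp
    · by_cases h2 : c = "Y"
      · subst h2
        simp only [BEq.rfl, if_true] at hoccX hoccY ⊢
        simp only [show (("Y" : String) == "X") = false from rfl] at hoccX
        rw [ih, hrow, pvVAL_get?, hoccX, hoccY, pv_last_append]
        simp [pv_last_cons]
      · have bX : (c == "X") = false := by simp [h1]
        have bY : (c == "Y") = false := by simp [h2]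
        rw [hoccX, hoccY] at *
        by_cases h3 : c = "0"
        · subst h3
          simp only [bX, bY] at *
          rw [ih, hrow, pvVAL_get?]
          simp
        · by_cases h4 : c = "1"
          · subst h4
            simp only [bX, bY] at *
            rw [ih, hrow, pvVAL_get?]
            simp
          · have b0 : (c == "0") = false := by simp [h3]
            have b1 : (c == "1") = false := by simp [h4]
            simp only [bX, bY, b0, b1]
            rw [ih, hrow, pvVAL_get?]
            simp [bX, bY, b0, b1]

lemma outer_fold_eq (maze_data : List (List String)) : ∀ (s : Int) (mz : List (List Int))
    (sc ec : Option (List Int)),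
    (PySem.List.enumerate maze_data s).foldl
      (fun (st : List (List Int) × Option (List Int) × Option (List Int)) p =>
        let inner := (PySem.List.enumerate p.2 0).foldl
          (fun (st2 : List Int × Option (List Int) × Option (List Int)) q =>
            if q.2 == "X" then (st2.1 ++ [0], some [p.1, q.1], st2.2.2)
            else if q.2 == "Y" then (st2.1 ++ [0], st2.2.1, some [p.1, q.1])
            else if q.2 == "0" then (st2.1 ++ [0], st2.2.1, st2.2.2)
            else if q.2 == "1" then (st2.1 ++ [1], st2.2.1, st2.2.2)
            else st2)
          ([], st.2.1, st.2.2)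
        (st.1 ++ [inner.1], inner.2.1, inner.2.2))
      (mz, sc, ec)
    = (mz ++ maze_data.map pvMazeRow,
       (((PySem.List.enumerate maze_data s).flatMap (fun p =>
          (PySem.List.enumerate p.2 0).filterMap (fun q =>
            if q.2 == "X" then some [p.1, q.1] else none))).getLast?).elim sc some,
       (((PySem.List.enumerate maze_data s).flatMap (fun p =>
          (PySem.List.enumerate p.2 0).filterMap (fun q =>
            if q.2 == "Y" then some [p.1, q.1] else none))).getLast?).elim ec some) := by
  induction maze_data with
  | nil => intro s mz sc ec; simp [PySem.List.enumerate_nil]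
  | cons row rest ih =>
    intro s mz sc ec
    rw [PySem.List.enumerate_cons]
    simp only [List.foldl_cons, List.flatMap_cons, List.map_cons]
    rw [inner_fold_eq s row 0 [] sc ec]
    rw [ih]
    rw [pv_last_append, pv_last_append]
    simp only [List.append_assoc, List.cons_append]
    rfl

-- length of the occurrence list of ch in one row = number of cells equal to ch
lemma occRow_length (i : Int) (row : List String) (ch : String) : ∀ (s : Int),
    (pvOccRow i row s ch).length = row.count ch := by
  induction row with
  | nil => intro s; simp [pvOccRow, PySem.List.enumerate_nil]
  | cons c rest ih =>
    intro s
    simp only [pvOccRow, PySem.List.enumerate_cons, List.filterMap_cons] at *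
    by_cases h : c = ch
    · subst h
      simp only [BEq.rfl, if_true, List.length_cons, List.count_cons_self]
      rw [ih]
    · have hb : (c == ch) = false := by simp [h]
      simp only [hb, Bool.false_eq_true, if_false, List.count_cons]
      rw [ih]
      simp [h, Ne.symm h]

lemma occ_length (maze_data : List (List String)) (ch : String) : ∀ (s : Int),
    (((PySem.List.enumerate maze_data s).flatMap (fun p =>
        (PySem.List.enumerate p.2 0).filterMap (fun q =>
          if q.2 == ch then some [p.1, q.1] else none)))).length
    = (maze_data.flatMap id).count ch := by
  induction maze_data with
  | nil => intro s; simp [PySem.List.enumerate_nil]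
  | cons row rest ih =>
    intro s
    simp only [PySem.List.enumerate_cons, List.flatMap_cons, List.length_append,
      List.count_append, id] at *
    rw [ih]
    have := occRow_length s row ch 0
    simp only [pvOccRow] at this
    omega

lemma last_eq_head_of_short {α : Type} (l : List α) (h : l.length ≤ 1) :
    l.getLast? = l.head? := by
  cases l with
  | nil => rfl
  | cons x t => cases t with
    | nil => rfl
    | cons y u => simp at h

-- ===== VERDICT (by name: the statement is the Claim_ definition above) =====
theorem extract_maze_data_spec : Claim_equal_extract_maze_data := by
  intro md _ hpre
  obtain ⟨hX, hY⟩ := hpre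
  show _ = _
  simp only [extract_maze_data, extract_maze_data_alt, pvFirstPos, pvOcc]
  rw [outer_fold_eq md 0 [] none none]
  rw [last_eq_head_of_short _ (by rw [occ_length]; exact hX),
      last_eq_head_of_short _ (by rw [occ_length]; exact hY)]
  simp [pv_elim_none_some]
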